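-- pv_equiv track=rewrite | github.com/acabhishek942/ProjectEuler | Solutions/PE#30.py | verifyDigitPowerSum
-- ===== SOURCE A (Python) =====
-- def getDigits(number):
--     """
--     Get the digit^5 of the given number in a list.
--     """
--     digitList = []
--     while number:
--         digit = number % 10
--         digitList.append(digit)
--         number //= 10
--     return digitList
--
-- def verifyDigitPowerSum(number):
--     """
--     Verify that number is equal to sum of
--     its digits to the 5th power
--     """
--     sumof5thPower = 0
--     digits = getDigits(number)
--     for i in digits:
--         sumof5thPower += i**5
--     if sumof5thPower == number:
--         return True
--     return False
-- ===== SOURCE B (Python) =====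
-- def verifyDigitPowerSum(number):
--     return sum(int(d) ** 5 for d in str(number)) == number
-- ===== Notes on version B (the rewrite author's own statement) =====
-- stated objective: simpler
-- what changed: B obtains the digits by traversing the decimal string str(number) in a one-line generator sum instead of A's while-loop that builds a digit list via modulo and floor-division and then folds it; Pre_ excludes negative numbers, on which A's while-loop never terminates.
import Mathlib
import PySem

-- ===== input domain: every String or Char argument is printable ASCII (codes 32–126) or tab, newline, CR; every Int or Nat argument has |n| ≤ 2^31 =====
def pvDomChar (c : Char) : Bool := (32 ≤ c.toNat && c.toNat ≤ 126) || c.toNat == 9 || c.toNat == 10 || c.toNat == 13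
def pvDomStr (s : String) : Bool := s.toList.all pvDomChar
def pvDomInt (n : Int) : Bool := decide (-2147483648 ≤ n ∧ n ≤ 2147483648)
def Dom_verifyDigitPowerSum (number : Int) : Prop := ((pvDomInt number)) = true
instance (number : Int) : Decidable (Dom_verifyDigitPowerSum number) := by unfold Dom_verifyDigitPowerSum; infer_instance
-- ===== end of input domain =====

-- B replaces the while-loop modulo digit extraction by a one-line sum over the decimal
-- string of the number (objective: simpler).

-- ===== PORT A =====
-- 'while number:' with 'number //= 10': for 0 ≤ number this is 'while 0 < number';
-- on negative number the Python loop never terminates (outside Pre_), the port returns [].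
def getDigits (number : Int) : List Int :=
  if _h : 0 < number then
    PySem.Int.mod number 10 :: getDigits (PySem.Int.floordiv number 10)
  else []
termination_by number.toNat
decreasing_by
  rw [PySem.Int.floordiv_eq_ediv_of_pos (by omega)]
  omega

def verifyDigitPowerSum (number : Int) : Bool :=
  let digits := getDigits number
  let sumof5thPower := digits.foldl (fun acc i => acc + i ^ 5) 0
  if sumof5thPower = number then true else false

-- ===== PORT B =====
-- int(d) for a single char d: PySem.Int.ofChars? [d]; it is some on every char of
-- str(number) for 0 ≤ number (the digits '0'..'9'), so the .getD 0 default is never used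
-- inside Pre_.
def verifyDigitPowerSum_alt (number : Int) : Bool :=
  (((PySem.Int.toStr number).toList.map
      (fun d => ((PySem.Int.ofChars? [d]).getD 0) ^ 5)).sum = number : Bool)

-- ===== PRECONDITION & SPEC =====
-- Pre_ excludes negative numbers, on which A's while-loop never terminates
-- (repeated floor-division never reaches zero from below), so A returns no value there.
def Pre_verifyDigitPowerSum (number : Int) : Prop := 0 ≤ number
instance (number : Int) : Decidable (Pre_verifyDigitPowerSum number) := by
  unfold Pre_verifyDigitPowerSum; infer_instance

def pvWitness_verifyDigitPowerSum : Int := 4150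

def Spec_verifyDigitPowerSum (number : Int) (out : Bool) : Prop := out = verifyDigitPowerSum_alt number
instance (number : Int) (out : Bool) : Decidable (Spec_verifyDigitPowerSum number out) := by unfold Spec_verifyDigitPowerSum; infer_instance

-- ===== CLAIM (what is proved, stated in full; the proofs are below) =====
def Claim_equal_verifyDigitPowerSum : Prop := ∀ (number : Int), Dom_verifyDigitPowerSum number → Pre_verifyDigitPowerSum number → Spec_verifyDigitPowerSum number (verifyDigitPowerSum number)

-- ===== LEMMAS AND PROOFS =====

-- Sum of fifth powers of the decimal digits of a natural number, by the same
-- division structure Nat.toDigitsCore follows (recursion stops when m / 10 = 0).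
def sumdig (m : Nat) : Int :=
  ((m % 10 : Nat) : Int) ^ 5 + if h : m / 10 = 0 then 0 else sumdig (m / 10)
termination_by m
decreasing_by omega

-- int('0'..'9') as B computes it
theorem val_digitChar : ∀ d < 10, ((PySem.Int.ofChars? [Nat.digitChar d]).getD 0) = (d : Int) := by
  decide

theorem sum_toDigitsCore (f : Nat) : ∀ (m : Nat) (acc : List Char), m < f →
    ((Nat.toDigitsCore 10 f m acc).map (fun d => ((PySem.Int.ofChars? [d]).getD 0) ^ 5)).sum
      = sumdig m + ((acc.map (fun d => ((PySem.Int.ofChars? [d]).getD 0) ^ 5)).sum) := by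
  induction f with
  | zero => intro m acc h; omega
  | succ f ih =>
    intro m acc h
    have hd : ((PySem.Int.ofChars? [(m % 10).digitChar]).getD 0) = ((m % 10 : Nat) : Int) :=
      val_digitChar _ (Nat.mod_lt _ (by omega))
    by_cases h0 : m / 10 = 0
    · have e1 : Nat.toDigitsCore 10 (f + 1) m acc = (m % 10).digitChar :: acc := by
        rw [Nat.toDigitsCore]; simp [h0]
      rw [e1, List.map_cons, List.sum_cons, hd, sumdig, dif_pos h0]
      ring
    · have e2 : Nat.toDigitsCore 10 (f + 1) m acc
          = Nat.toDigitsCore 10 f (m / 10) ((m % 10).digitChar :: acc) := by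
        rw [Nat.toDigitsCore]; simp [h0]
      rw [e2, ih (m / 10) _ (by omega), List.map_cons, List.sum_cons, hd]
      conv_rhs => rw [sumdig, dif_neg h0]
      ring

theorem sum_getDigits (k : Nat) : ∀ (n : Int), n.toNat ≤ k → 0 < n →
    ((getDigits n).map (fun i => i ^ 5)).sum = sumdig n.toNat := by
  induction k with
  | zero => intro n hk h; omega
  | succ k ih =>
    intro n hk h
    rw [getDigits, dif_pos h]
    have hflo : PySem.Int.floordiv n 10 = n / 10 := PySem.Int.floordiv_eq_ediv_of_pos (by omega)
    have hmod : PySem.Int.mod n 10 = n % 10 := PySem.Int.mod_eq_emod_of_pos (by omega)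
    simp only [List.map_cons, List.sum_cons, hflo, hmod]
    conv_rhs => rw [sumdig]
    have hmodc : n % 10 = ((n.toNat % 10 : Nat) : Int) := by omega
    by_cases h0 : n / 10 = 0
    · rw [h0, getDigits, dif_neg (by omega)]
      have hq : n.toNat / 10 = 0 := by omega
      simp [hq, hmodc]
    · have hpos : 0 < n / 10 := by omega
      rw [ih (n / 10) (by omega) hpos]
      have hq : (n / 10).toNat = n.toNat / 10 := by omega
      rw [hq, dif_neg (by omega), hmodc]

-- both sides compute the same digit fifth-power sum for 0 ≤ n
theorem sums_agree (n : Int) (h : 0 ≤ n) :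
    ((getDigits n).foldl (fun acc i => acc + i ^ 5) 0)
      = (((PySem.Int.toChars n).map (fun d => ((PySem.Int.ofChars? [d]).getD 0) ^ 5)).sum) := by
  rw [PySem.List.foldl_add, zero_add]
  rw [PySem.Int.toChars, if_neg (by omega), Nat.toDigits]
  rw [sum_toDigitsCore (n.toNat + 1) n.toNat [] (by omega)]
  simp only [List.map_nil, List.sum_nil, add_zero]
  by_cases h0 : 0 < n
  · exact sum_getDigits n.toNat n (by omega) h0
  · have hn0 : n = 0 := by omega
    subst hn0
    rw [getDigits, dif_neg (by omega)]
    simp [sumdig]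

-- ===== VERDICT (by name: the statement is the Claim_ definition above) =====
theorem verifyDigitPowerSum_spec : Claim_equal_verifyDigitPowerSum := by
  intro number _ hpre
  unfold Spec_verifyDigitPowerSum verifyDigitPowerSum verifyDigitPowerSum_alt
  simp only [PySem.Int.toList_toStr, sums_agree number hpre]
  split_ifs with h <;> simp [h]
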